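-- pv_equiv track=rewrite | github.com/adioby/MyChains | MyChains.py | trouver_car_debut_block
-- ===== SOURCE A (Python) =====
-- def trouver_car_debut_block(chaine):
--     ch = str(chaine)
--     n = len(ch)
--     x0 = "([{"
--
--     for i in range(n):
--         x = ch[i]
--         if x != "":
--             if x in x0:
--                 return x
--     return ''
-- ===== SOURCE B (Python) =====
-- def trouver_car_debut_block(chaine):
--     ch = str(chaine)
--     best = min((p for p in (ch.find(b) for b in "([{") if p != -1), default=-1)
--     return '' if best == -1 else ch[best]
-- ===== Notes on version B (the rewrite author's own statement) =====
-- stated objective: faster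
-- what changed: Instead of scanning the string character by character with an early return, B computes the first-occurrence position of each of the three bracket characters with str.find and reduces the found positions by min, indexing the string at the winner.
import Mathlib
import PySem

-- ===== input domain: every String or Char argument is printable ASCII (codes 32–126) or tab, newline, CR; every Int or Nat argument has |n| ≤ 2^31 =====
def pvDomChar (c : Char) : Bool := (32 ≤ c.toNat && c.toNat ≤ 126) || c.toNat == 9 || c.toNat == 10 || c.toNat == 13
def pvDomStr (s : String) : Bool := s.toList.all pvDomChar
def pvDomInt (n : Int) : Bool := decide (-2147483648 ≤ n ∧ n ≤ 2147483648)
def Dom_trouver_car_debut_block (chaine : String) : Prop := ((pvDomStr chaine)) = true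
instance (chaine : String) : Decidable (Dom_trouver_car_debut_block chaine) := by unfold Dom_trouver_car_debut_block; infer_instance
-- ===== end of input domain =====

-- B finds each bracket's first position with str.find and reduces by min instead of
-- A's character-by-character scan with early return (faster in a timing run:
-- three C-level scans instead of an interpreted per-character loop).

-- ===== PORT A =====
-- the 'for i in range(n): x = ch[i]; if x != "": if x in x0: return x' loop,
-- as structural recursion over the remaining characters (x = ch[i] is the head)
def pvLoopA (x0 : String) : List Char → String
  | [] => ""
  | x :: rest =>
    if String.ofList [x] ≠ "" then
      if PySem.Str.isIn (String.ofList [x]) x0 then String.ofList [x] else pvLoopA x0 rest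
    else pvLoopA x0 rest

def trouver_car_debut_block (chaine : String) : String :=
  let ch := chaine            -- str(chaine): identity on a str argument
  let x0 := "([{"
  pvLoopA x0 ch.toList

-- ===== PORT B =====
def trouver_car_debut_block_alt (chaine : String) : String :=
  let ch := chaine            -- str(chaine): identity on a str argument
  let best : Int :=
    (PySem.List.min?
      ((("([{".toList).map (fun b => PySem.Str.find ch (String.ofList [b]))).filter
        (fun p => decide (p ≠ -1))) id).getD (-1)
  if best = -1 then ""
  else
    match PySem.Str.pyGet? ch best with   -- ch[best]; in Python best is always in range here
    | some c => String.ofList [c]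
    | none => ""

-- ===== PRECONDITION & SPEC =====
def Spec_trouver_car_debut_block (chaine : String) (out : String) : Prop := out = trouver_car_debut_block_alt chaine
instance (chaine : String) (out : String) : Decidable (Spec_trouver_car_debut_block chaine out) := by unfold Spec_trouver_car_debut_block; infer_instance

-- ===== CLAIM (what is proved, stated in full; the proofs are below) =====
def Claim_equal_trouver_car_debut_block : Prop := ∀ (chaine : String), Dom_trouver_car_debut_block chaine → Spec_trouver_car_debut_block chaine (trouver_car_debut_block chaine)

-- ===== LEMMAS AND PROOFS =====

-- first index of c in l, Python-style (-1 if absent)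
def pvFi (l : List Char) (c : Char) : Int :=
  match l.idxOf? c with
  | some i => (i : Int)
  | none => -1

-- the fold underlying Python's min
def pvG (acc : Option Int) (x : Int) : Option Int :=
  match acc with
  | none => some x
  | some m => if x < m then some x else some m

-- best position among brackets bs in l (-1 if none found)
def pvBestAux (bs : List Char) (l : List Char) : Int :=
  ((bs.map (pvFi l)).filter (fun p => decide (p ≠ -1)) |>.foldl pvG none).getD (-1)

lemma pvMin?_eq_foldl (xs : List Int) :
    PySem.List.min? xs (id : Int → Int) = xs.foldl pvG none := by
  unfold PySem.List.min?
  congr 1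
  funext acc x
  cases acc <;> rfl

lemma pvPrefix_singleton (c : Char) (s : List Char) : [c] <+: s ↔ s.head? = some c := by
  cases s with
  | nil => simp
  | cons x t => simp [List.cons_prefix_cons, eq_comm]

lemma pvInfix_singleton (c : Char) (s : List Char) : [c] <:+: s ↔ c ∈ s := by
  constructor
  · intro h; exact List.singleton_sublist.mp h.sublist
  · intro h
    obtain ⟨u, v, rfl⟩ := List.mem_iff_append.mp h
    exact ⟨u, v, by simp⟩

lemma pvFind_singleton (l : List Char) (c : Char) : PySem.Chars.find l [c] = pvFi l c := by
  by_cases h : c ∈ l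
  · have hne : PySem.Chars.find l [c] ≠ -1 := by
      rw [Ne, PySem.Chars.find_eq_neg_one_iff, not_not, pvInfix_singleton]; exact h
    have hnn : 0 ≤ PySem.Chars.find l [c] := by
      have := PySem.Chars.neg_one_le_find l [c]; omega
    obtain ⟨h1, h2⟩ := PySem.Chars.find_spec hnn
    set k := (PySem.Chars.find l [c]).toNat with hk
    have hget : l[k]? = some c := by
      rw [← List.head?_drop]; exact (pvPrefix_singleton c _).mp h1
    have hlt : k < l.length := (List.getElem?_eq_some_iff.mp hget).1
    have hidx : l.idxOf? c = some k := by
      rw [List.idxOf?_eq_some_iff]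
      refine ⟨hlt, (List.getElem?_eq_some_iff.mp hget).2, ?_⟩
      intro j hj he
      apply h2 j hj
      rw [pvPrefix_singleton, List.head?_drop, List.getElem?_eq_some_iff]
      exact ⟨hj.trans hlt, he⟩
    unfold pvFi
    simp only [hidx]
    omega
  · have h1 : PySem.Chars.find l [c] = -1 := by
      rw [PySem.Chars.find_eq_neg_one_iff, pvInfix_singleton]; exact h
    unfold pvFi; rw [List.idxOf?_eq_none_iff.mpr h, h1]

lemma pvFi_neg_one_le (l : List Char) (c : Char) : -1 ≤ pvFi l c := by
  cases h : l.idxOf? c <;> simp [pvFi, h]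

lemma pvFi_cons (x : Char) (t : List Char) (c : Char) :
    pvFi (x :: t) c = if x = c then 0 else (if pvFi t c = -1 then -1 else pvFi t c + 1) := by
  unfold pvFi
  rw [List.idxOf?_cons]
  by_cases hxc : x = c
  · simp [hxc]
  · rw [if_neg (by simpa using hxc), if_neg hxc]
    cases h : t.idxOf? c with
    | none => simp
    | some i =>
      have hne : ((i : Int)) ≠ -1 := by omega
      simp [hne]

lemma pvFoldl_mem (xs : List Int) (acc : Option Int) (m : Int)
    (h : xs.foldl pvG acc = some m) : acc = some m ∨ m ∈ xs := by
  induction xs generalizing acc with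
  | nil => exact Or.inl h
  | cons x t ih =>
    rcases ih (pvG acc x) h with h1 | h1
    · cases acc with
      | none => simp [pvG] at h1; simp [h1]
      | some a =>
        simp only [pvG] at h1
        split at h1
        · simp at h1; simp [h1]
        · exact Or.inl h1
    · simp [h1]

lemma pvFoldl_lb (xs : List Int) (acc : Option Int) (m : Int)
    (h : xs.foldl pvG acc = some m) :
    (∀ a, acc = some a → m ≤ a) ∧ ∀ v ∈ xs, m ≤ v := by
  induction xs generalizing acc with
  | nil =>
    exact ⟨fun a ha => by
      simp only [List.foldl_nil] at h; rw [h] at ha; injection ha with e; omega, by simp⟩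
  | cons x t ih =>
    obtain ⟨hacc, hmem⟩ := ih (pvG acc x) h
    have hx : m ≤ x := by
      cases acc with
      | none => exact hacc x rfl
      | some a =>
        simp only [pvG] at hacc
        split at hacc
        · have := hacc x rfl; omega
        · rename_i hlt; have := hacc a rfl; omega
    refine ⟨fun a ha => ?_, ?_⟩
    · subst ha
      simp only [pvG] at hacc
      split at hacc
      · rename_i hlt; have := hacc x rfl; omega
      · exact hacc a rfl
    · intro v hv
      rcases List.mem_cons.mp hv with rfl | hv
      · exact hx
      · exact hmem v hv

lemma pvFoldl_ne_none (xs : List Int) (a : Int) : xs.foldl pvG (some a) ≠ none := by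
  induction xs generalizing a with
  | nil => simp
  | cons x t ih =>
    simp only [List.foldl_cons, pvG]
    split <;> apply ih

lemma pvFoldl_map_add_one (xs : List Int) (acc : Option Int) :
    (xs.map (· + 1)).foldl pvG (acc.map (· + 1)) = (xs.foldl pvG acc).map (· + 1) := by
  induction xs generalizing acc with
  | nil => simp
  | cons x t ih =>
    simp only [List.map_cons, List.foldl_cons]
    have hstep : pvG (acc.map (· + 1)) (x + 1) = (pvG acc x).map (· + 1) := by
      cases acc with
      | none => simp [pvG]
      | some a =>
        simp only [pvG, Option.map_some]
        by_cases hxa : x < a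
        · rw [if_pos (by omega), if_pos hxa]; simp
        · rw [if_neg (by omega), if_neg hxa]; simp
    rw [hstep, ih]

lemma pvFoldl_none_ne_none (xs : List Int) (hne : xs ≠ []) : xs.foldl pvG none ≠ none := by
  cases xs with
  | nil => exact absurd rfl hne
  | cons x t => simp only [List.foldl_cons, pvG]; exact pvFoldl_ne_none t x

lemma pvFilter_shift (bs : List Char) (f : Char → Int) (hf : ∀ b, -1 ≤ f b) :
    ((bs.map (fun b => if f b = -1 then -1 else f b + 1)).filter (fun p => decide (p ≠ -1)))
      = ((bs.map f).filter (fun p => decide (p ≠ -1))).map (· + 1) := by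
  induction bs with
  | nil => rfl
  | cons b t ih =>
    by_cases h : f b = -1
    · simpa [h] using ih
    · have h1 : f b + 1 ≠ -1 := by have := hf b; omega
      simpa [h, h1] using ih

lemma pvBestAux_mem_nonneg (bs l : List Char) (v : Int)
    (hv : v ∈ (bs.map (pvFi l)).filter (fun p => decide (p ≠ -1))) : 0 ≤ v := by
  obtain ⟨hv1, hv2⟩ := List.mem_filter.mp hv
  obtain ⟨b, hb, rfl⟩ := List.mem_map.mp hv1
  have h1 := pvFi_neg_one_le l b
  have h2 : pvFi l b ≠ -1 := by simpa using hv2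
  omega

lemma pvBestAux_nil (bs : List Char) : pvBestAux bs [] = -1 := by
  unfold pvBestAux
  have h : bs.map (pvFi []) = bs.map (fun _ => (-1 : Int)) := by
    apply List.map_congr_left; intro b _; rfl
  rw [h]
  simp

lemma pvBestAux_cases (bs l : List Char) : pvBestAux bs l = -1 ∨ 0 ≤ pvBestAux bs l := by
  unfold pvBestAux
  cases h : ((bs.map (pvFi l)).filter (fun p => decide (p ≠ -1))).foldl pvG none with
  | none => simp
  | some m =>
    right
    rcases pvFoldl_mem _ _ _ h with h1 | h1
    · exact absurd h1 (by simp)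
    · simpa using pvBestAux_mem_nonneg bs l m h1

lemma pvBestAux_cons_mem (bs : List Char) (x : Char) (t : List Char) (h : x ∈ bs) :
    pvBestAux bs (x :: t) = 0 := by
  unfold pvBestAux
  have h0 : pvFi (x :: t) x = 0 := by rw [pvFi_cons, if_pos rfl]
  have hmem : (0 : Int) ∈ (bs.map (pvFi (x :: t))).filter (fun p => decide (p ≠ -1)) :=
    List.mem_filter.mpr ⟨List.mem_map.mpr ⟨x, h, h0⟩, by simp⟩
  cases hf : ((bs.map (pvFi (x :: t))).filter (fun p => decide (p ≠ -1))).foldl pvG none with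
  | none => exact absurd hf (pvFoldl_none_ne_none _ (List.ne_nil_of_mem hmem))
  | some m =>
    have hub : m ≤ 0 := (pvFoldl_lb _ _ _ hf).2 0 hmem
    have hlo : 0 ≤ m := by
      rcases pvFoldl_mem _ _ _ hf with h1 | h1
      · exact absurd h1 (by simp)
      · exact pvBestAux_mem_nonneg bs (x :: t) m h1
    simp only [Option.getD_some]
    omega

lemma pvBestAux_cons_not_mem (bs : List Char) (x : Char) (t : List Char) (h : x ∉ bs) :
    pvBestAux bs (x :: t) = if pvBestAux bs t = -1 then -1 else pvBestAux bs t + 1 := by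
  unfold pvBestAux
  have hmap : bs.map (pvFi (x :: t))
      = bs.map (fun b => if pvFi t b = -1 then -1 else pvFi t b + 1) := by
    apply List.map_congr_left
    intro b hb
    rw [pvFi_cons, if_neg (fun e => h (by rw [e]; exact hb))]
  rw [hmap, pvFilter_shift bs (pvFi t) (fun b => pvFi_neg_one_le t b)]
  have hfold := pvFoldl_map_add_one ((bs.map (pvFi t)).filter (fun p => decide (p ≠ -1))) none
  simp only [Option.map_none] at hfold
  rw [hfold]
  cases hft : ((bs.map (pvFi t)).filter (fun p => decide (p ≠ -1))).foldl pvG none with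
  | none => simp
  | some m =>
    have hm : m ≠ -1 := by
      rcases pvFoldl_mem _ _ _ hft with h1 | h1
      · exact absurd h1 (by simp)
      · have := pvBestAux_mem_nonneg bs t m h1; omega
    simp [hm]

def pvAltCore (l : List Char) : String :=
  let best := pvBestAux ("([{".toList) l
  if best = -1 then ""
  else
    match PySem.List.pyGet? l best with
    | some c => String.ofList [c]
    | none => ""

lemma pvMk_toList (c : Char) : (String.ofList [c]).toList = [c] := String.toList_ofList

lemma pvMk_ne_empty (c : Char) : String.ofList [c] ≠ "" := by
  intro e
  have h := congrArg String.toList e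
  rw [pvMk_toList] at h
  simp at h

lemma pvAlt_eq_core (s : String) : trouver_car_debut_block_alt s = pvAltCore s.toList := by
  unfold trouver_car_debut_block_alt pvAltCore pvBestAux
  have h1 : ("([{".toList).map (fun b => PySem.Str.find s (String.ofList [b]))
      = ("([{".toList).map (pvFi s.toList) := by
    apply List.map_congr_left
    intro b _
    rw [PySem.Str.find_eq, pvMk_toList b]
    exact pvFind_singleton s.toList b
  simp only [h1, pvMin?_eq_foldl, PySem.Str.pyGet?, PySem.Chars.pyGet?_eq_listPyGet?]

lemma pvCore_eq_loop (l : List Char) : pvAltCore l = pvLoopA "([{" l := by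
  induction l with
  | nil => simp [pvAltCore, pvBestAux_nil, pvLoopA]
  | cons x t ih =>
    by_cases hx : x ∈ "([{".toList
    · have hisin : PySem.Str.isIn (String.ofList [x]) "([{" = true := by
        rw [PySem.Str.isIn_iff_infix, pvMk_toList]
        exact (pvInfix_singleton x ("([{".toList)).mpr hx
      unfold pvAltCore pvLoopA
      rw [pvBestAux_cons_mem _ _ _ hx]
      rw [if_neg (show ¬((0 : Int) = -1) by norm_num)]
      rw [if_pos (pvMk_ne_empty x), hisin, if_pos rfl]
      have hget0 : PySem.List.pyGet? (x :: t) (0 : Int) = some x := by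
        simp [PySem.List.pyGet?, PySem.List.pyIdx?]
      rw [hget0]
    · have hisin : PySem.Str.isIn (String.ofList [x]) "([{" = false := by
        rw [← Bool.not_eq_true, PySem.Str.isIn_iff_infix, pvMk_toList]
        intro hinf
        exact hx ((pvInfix_singleton x ("([{".toList)).mp hinf)
      unfold pvAltCore pvLoopA
      rw [pvBestAux_cons_not_mem _ _ _ hx]
      rw [if_pos (pvMk_ne_empty x), hisin]
      simp only [Bool.false_eq_true, if_false]
      rw [← ih]
      unfold pvAltCore
      rcases pvBestAux_cases ("([{".toList) t with hm | hm
      · rw [hm]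
        norm_num
      · have hm1 : pvBestAux ("([{".toList) t ≠ -1 := by omega
        rw [if_neg hm1]
        rw [if_neg (show ¬(pvBestAux ("([{".toList) t + 1 = -1) by omega)]
        rw [if_neg hm1]
        have hcast : pvBestAux ("([{".toList) t
            = ((pvBestAux ("([{".toList) t).toNat : Int) := by omega
        have hget : PySem.List.pyGet? (x :: t) (pvBestAux ("([{".toList) t + 1)
            = PySem.List.pyGet? t (pvBestAux ("([{".toList) t) := by
          rw [hcast]
          have h2 : (((pvBestAux ("([{".toList) t).toNat : Nat) : Int) + 1
              = (((pvBestAux ("([{".toList) t).toNat + 1 : Nat) : Int) := by push_cast; ring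
          rw [h2, PySem.List.pyGet?_natCast, PySem.List.pyGet?_natCast]
          simp
        rw [hget]

-- ===== VERDICT (by name: the statement is the Claim_ definition above) =====
theorem trouver_car_debut_block_spec : Claim_equal_trouver_car_debut_block := by
  intro chaine _
  unfold Spec_trouver_car_debut_block trouver_car_debut_block
  rw [pvAlt_eq_core, pvCore_eq_loop]
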